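-- pv_equiv track=rewrite | github.com/MIMPython/MIMPython2022-Assignment | Assignment-week06/week06_student28_MaiThanhLiem/week06_assignment01_student28_MaiThanhLiem.py | columnSums
-- ===== SOURCE A (Python) =====
-- def columnSums(arrayA):
--     resultA = []
--     sumOfColumn = 0
--     numberOfArrayRows = len(arrayA)
--     numberOfArrayColumns = len(arrayA[0])
--
--     for i in range(numberOfArrayColumns):
--         for j in range(numberOfArrayRows):
--             sumOfColumn += arrayA[j][i]
--         resultA.append(sumOfColumn)
--         sumOfColumn = 0
--
--     return resultA
-- ===== SOURCE B (Python) =====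
-- def columnSums(arrayA):
--     numberOfArrayColumns = len(arrayA[0])
--     result = [0] * numberOfArrayColumns
--     for row in arrayA:
--         result = [result[i] + row[i] for i in range(numberOfArrayColumns)]
--     return result
-- ===== Notes on version B (the rewrite author's own statement) =====
-- stated objective: alternative
-- what changed: Replaces A's column-major nested index loops (one scalar accumulator, rescanning all rows per column) with a single row-major pass that maintains the whole vector of running column sums at once.
import Mathlib
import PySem

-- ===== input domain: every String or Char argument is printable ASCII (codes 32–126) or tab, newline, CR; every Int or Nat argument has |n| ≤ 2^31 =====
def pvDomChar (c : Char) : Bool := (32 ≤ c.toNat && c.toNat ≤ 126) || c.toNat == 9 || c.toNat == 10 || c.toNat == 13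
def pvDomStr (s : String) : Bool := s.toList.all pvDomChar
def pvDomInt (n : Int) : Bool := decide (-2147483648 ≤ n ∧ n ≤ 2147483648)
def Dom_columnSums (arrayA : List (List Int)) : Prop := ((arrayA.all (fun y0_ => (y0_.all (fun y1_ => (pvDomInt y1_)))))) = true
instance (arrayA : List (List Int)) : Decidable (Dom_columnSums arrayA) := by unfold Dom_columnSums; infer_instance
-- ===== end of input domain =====

-- B replaces A's column-major nested index loops with one row-major pass maintaining the vector of running column sums (alternative decomposition, same cost).

-- ===== PORT A =====
def columnSums (arrayA : List (List Int)) : List Int :=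
  let numberOfArrayRows : Int := arrayA.length
  let numberOfArrayColumns : Int := ((PySem.List.pyGetD arrayA 0 []).length : Int)
  (PySem.List.pyRange 0 numberOfArrayColumns 1).foldl
    (fun resultA i =>
      let sumOfColumn :=
        (PySem.List.pyRange 0 numberOfArrayRows 1).foldl
          (fun s j => s + PySem.List.pyGetD (PySem.List.pyGetD arrayA j []) i 0) 0
      resultA ++ [sumOfColumn]) []

-- ===== PORT B =====
def columnSums_alt (arrayA : List (List Int)) : List Int :=
  let numberOfArrayColumns : Int := ((PySem.List.pyGetD arrayA 0 []).length : Int)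
  arrayA.foldl
    (fun result row =>
      (PySem.List.pyRange 0 numberOfArrayColumns 1).map
        (fun i => PySem.List.pyGetD result i 0 + PySem.List.pyGetD row i 0))
    (PySem.List.pyRepeat [0] numberOfArrayColumns)

-- ===== PRECONDITION & SPEC =====
-- Pre_ excludes exactly the inputs where Python A raises IndexError: the empty list
-- (arrayA[0]) and arrays with a row shorter than row 0 (arrayA[j][i]).
def Pre_columnSums (arrayA : List (List Int)) : Prop :=
  arrayA ≠ [] ∧ ∀ row ∈ arrayA, (arrayA.headD []).length ≤ row.length
instance (arrayA : List (List Int)) : Decidable (Pre_columnSums arrayA) := by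
  unfold Pre_columnSums; infer_instance

def pvWitness_columnSums : List (List Int) := [[1, 2, 3], [4, 5, 6]]

def Spec_columnSums (arrayA : List (List Int)) (out : List Int) : Prop := out = columnSums_alt arrayA
instance (arrayA : List (List Int)) (out : List Int) : Decidable (Spec_columnSums arrayA out) := by unfold Spec_columnSums; infer_instance

-- ===== CLAIM (what is proved, stated in full; the proofs are below) =====
def Claim_equal_columnSums : Prop := ∀ (arrayA : List (List Int)), Dom_columnSums arrayA → Pre_columnSums arrayA → Spec_columnSums arrayA (columnSums arrayA)

-- ===== LEMMAS AND PROOFS =====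

-- B's row loop, for an accumulator of the right length: after folding all rows,
-- entry i holds the accumulator's entry i plus the sum over rows of row[i].
lemma alt_fold_eq (rows : List (List Int)) (res : List Int) :
    rows.foldl
      (fun result row =>
        (PySem.List.pyRange 0 (res.length : Int) 1).map
          (fun i => PySem.List.pyGetD result i 0 + PySem.List.pyGetD row i 0)) res
    = (PySem.List.pyRange 0 (res.length : Int) 1).map
        (fun i => PySem.List.pyGetD res i 0 + (rows.map (fun row => PySem.List.pyGetD row i 0)).sum) := by
  induction rows generalizing res with
  | nil =>
      simp only [List.foldl_nil, List.map_nil, List.sum_nil, add_zero]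
      exact (PySem.List.map_pyGetD_pyRange_zero' res 0).symm
  | cons r t ih =>
      have hlen : ((PySem.List.pyRange 0 (res.length : Int) 1).map
          (fun i => PySem.List.pyGetD res i 0 + PySem.List.pyGetD r i 0)).length = res.length := by
        simp [PySem.List.length_pyRange_one]
      rw [List.foldl_cons]
      have := ih ((PySem.List.pyRange 0 (res.length : Int) 1).map
          (fun i => PySem.List.pyGetD res i 0 + PySem.List.pyGetD r i 0))
      rw [hlen] at this
      rw [this]
      apply List.map_congr_left
      intro i hi
      rw [PySem.List.mem_pyRange_one] at hi
      rw [PySem.List.pyGetD_map_pyRange_of_nonneg _ _ _ _ hi.1 hi.2]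
      simp [List.map_cons, List.sum_cons]
      ring

-- ===== VERDICT (by name: the statement is the Claim_ definition above) =====
theorem columnSums_spec : Claim_equal_columnSums := by
  intro arrayA _ _
  unfold Spec_columnSums columnSums columnSums_alt
  simp only []
  have hrep : (PySem.List.pyRepeat [(0 : Int)] ((PySem.List.pyGetD arrayA 0 []).length : Int)).length
      = (PySem.List.pyGetD arrayA 0 []).length := by
    simp [PySem.List.pyRepeat_singleton]
  rw [PySem.List.foldl_append_singleton_eq_map, List.nil_append]
  have h := alt_fold_eq arrayA (PySem.List.pyRepeat [(0 : Int)] ((PySem.List.pyGetD arrayA 0 []).length : Int))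
  rw [hrep] at h
  rw [h]
  apply List.map_congr_left
  intro i hi
  rw [PySem.List.mem_pyRange_one] at hi
  rw [PySem.List.foldl_pyRange_zero_pyGetD' arrayA ([] : List Int)
        (fun s row => s + PySem.List.pyGetD row i 0) 0]
  rw [PySem.List.foldl_add]
  have hz : PySem.List.pyGetD (PySem.List.pyRepeat [(0 : Int)] ((PySem.List.pyGetD arrayA 0 []).length : Int)) i 0 = 0 := by
    rw [PySem.List.pyRepeat_singleton]
    simp [PySem.List.pyGetD, PySem.List.pyGet?, PySem.List.pyIdx?]
    split_ifs <;> simp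
  rw [hz]
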